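-- pv_equiv track=rewrite | github.com/NKN-85/agenda-scraper | matadero.py | extraer_seccion
-- ===== SOURCE A (Python) =====
-- def limpiar_texto(texto):
--     return " ".join(str(texto).split()).strip()
--
-- def normalizar_texto(texto):
--     t = limpiar_texto(texto).lower()
--     return (
--         t.replace("á", "a")
--         .replace("é", "e")
--         .replace("í", "i")
--         .replace("ó", "o")
--         .replace("ú", "u")
--     )
--
-- def extraer_seccion(lineas, nombre, stop_extra=None):
--     stop_extra = stop_extra or set()
--     stops = {
--         "fecha", "horario", "espacio", "lugar", "precio",
--         "categoria", "categoría", "formato", "institucion", "institución",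
--         "accesibilidad", "actividades", "actividades pasadas", "contact",
--     } | {normalizar_texto(x) for x in stop_extra}
--
--     objetivo = normalizar_texto(nombre)
--     for i, linea in enumerate(lineas):
--         if normalizar_texto(linea) != objetivo:
--             continue
--
--         out = []
--         j = i + 1
--         while j < len(lineas):
--             lj = normalizar_texto(lineas[j])
--             if lj in stops and lj != objetivo:
--                 break
--             out.append(lineas[j])
--             j += 1
--         return out
--
--     return []
-- ===== SOURCE B (Python) =====
-- def limpiar_texto(texto):
--     return " ".join(str(texto).split()).strip()
--
-- def normalizar_texto(texto):
--     t = limpiar_texto(texto).lower()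
--     return (
--         t.replace("á", "a")
--         .replace("é", "e")
--         .replace("í", "i")
--         .replace("ó", "o")
--         .replace("ú", "u")
--     )
--
-- _BASE_STOPS = {
--     "fecha", "horario", "espacio", "lugar", "precio",
--     "categoria", "categoría", "formato", "institucion", "institución",
--     "accesibilidad", "actividades", "actividades pasadas", "contact",
-- }
--
-- def extraer_seccion(lineas, nombre, stop_extra=None):
--     stops = _BASE_STOPS | {normalizar_texto(x) for x in (stop_extra or ())}
--     objetivo = normalizar_texto(nombre)
--     # Phase 1: partition the document into chunks delimited by stop lines
--     # (a delimiter is a line whose normalization is a stop word other than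
--     # objetivo; delimiter lines themselves belong to no chunk).
--     chunks = [[]]
--     for l in lineas:
--         n = normalizar_texto(l)
--         if n in stops and n != objetivo:
--             chunks.append([])
--         else:
--             chunks[-1].append((n, l))
--     # Phase 2: the section body is the remainder of the first chunk that
--     # contains a line normalizing to objetivo, after that line.
--     for ch in chunks:
--         for k, (n, _) in enumerate(ch):
--             if n == objetivo:
--                 return [orig for _, orig in ch[k + 1:]]
--     return []
-- ===== Notes on version B (the rewrite author's own statement) =====
-- stated objective: alternative
-- what changed: B first partitions the whole document into chunks delimited by stop lines (dropping the delimiters), then looks up the first chunk containing a line normalizing to nombre and returns that chunk's remainder after it, instead of A's scan-for-header-then-accumulate-until-stop loops.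
import Mathlib
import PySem

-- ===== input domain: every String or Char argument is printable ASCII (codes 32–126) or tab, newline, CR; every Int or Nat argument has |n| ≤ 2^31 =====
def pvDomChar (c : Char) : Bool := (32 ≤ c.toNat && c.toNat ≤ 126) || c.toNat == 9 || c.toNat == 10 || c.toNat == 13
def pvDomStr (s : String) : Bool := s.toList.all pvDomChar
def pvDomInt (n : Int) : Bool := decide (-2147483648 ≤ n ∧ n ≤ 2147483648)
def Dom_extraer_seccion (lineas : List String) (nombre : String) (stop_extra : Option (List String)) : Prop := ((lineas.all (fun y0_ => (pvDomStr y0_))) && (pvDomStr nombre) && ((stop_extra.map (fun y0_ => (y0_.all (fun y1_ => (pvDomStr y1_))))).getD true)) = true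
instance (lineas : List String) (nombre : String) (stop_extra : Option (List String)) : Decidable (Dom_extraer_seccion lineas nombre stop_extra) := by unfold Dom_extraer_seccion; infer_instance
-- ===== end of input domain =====

-- B partitions the document into chunks delimited by stop lines, then picks the
-- remainder of the first chunk that contains the header line, instead of A's
-- scan-for-header-then-accumulate-until-stop loops (same values, same cost).

-- ===== PORT A =====
-- shared module helpers limpiar_texto / normalizar_texto (used by both Pythons)
def pvLimpiar (texto : String) : String :=
  PySem.Str.strip (PySem.Str.join " " (PySem.Str.split₀ texto))

def pvNorm (texto : String) : String :=
  let t := PySem.Str.lower (pvLimpiar texto)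
  PySem.Str.replace (PySem.Str.replace (PySem.Str.replace (PySem.Str.replace
    (PySem.Str.replace t "á" "a") "é" "e") "í" "i") "ó" "o") "ú" "u"

-- stops = base set literal | {normalizar_texto(x) for x in (stop_extra or set())}
def pvStops (stop_extra : Option (List String)) : PySem.Set String :=
  PySem.Set.union
    (PySem.Set.ofList ["fecha", "horario", "espacio", "lugar", "precio",
      "categoria", "categoría", "formato", "institucion", "institución",
      "accesibilidad", "actividades", "actividades pasadas", "contact"])
    (PySem.Set.ofList ((stop_extra.getD []).map pvNorm))

-- A's inner while loop: collect lineas[j], j+1, … until a stop word (≠ objetivo)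
def pvAInner (lineas : List String) (stops : PySem.Set String) (objetivo : String) (j : Nat) : List String :=
  if h : j < lineas.length then
    let lj := pvNorm lineas[j]
    if stops.contains lj && !(lj == objetivo) then []
    else lineas[j] :: pvAInner lineas stops objetivo (j + 1)
  else []
termination_by lineas.length - j

-- A's outer 'for i, linea in enumerate(lineas)' loop
def pvAScan (stops : PySem.Set String) (objetivo : String) (lineas : List String) : List String → Nat → List String
  | [], _ => []
  | l :: tl, i =>
      if pvNorm l == objetivo then pvAInner lineas stops objetivo (i + 1)
      else pvAScan stops objetivo lineas tl (i + 1)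

def extraer_seccion (lineas : List String) (nombre : String) (stop_extra : Option (List String)) : List String :=
  let stops := pvStops stop_extra
  let objetivo := pvNorm nombre
  pvAScan stops objetivo lineas lineas 0

-- ===== PORT B =====
-- chunks[-1].append(x)
def pvAppendLast {α : Type} (chs : List (List α)) (x : α) : List (List α) :=
  match chs with
  | [] => [[x]]
  | [c] => [c ++ [x]]
  | c :: cs => c :: pvAppendLast cs x

-- body of B's phase-1 for loop
def pvStep (stops : PySem.Set String) (objetivo : String)
    (chs : List (List (String × String))) (l : String) : List (List (String × String)) :=
  let n := pvNorm l
  if stops.contains n && !(n == objetivo) then chs ++ [[]]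
  else pvAppendLast chs (n, l)

-- B's inner 'for k, (n, _) in enumerate(ch)' loop
def pvFindInChunk (objetivo : String) : List (String × String) → Option (List String)
  | [] => none
  | (n, _) :: tl => if n == objetivo then some (tl.map Prod.snd) else pvFindInChunk objetivo tl

-- B's phase-2 'for ch in chunks' loop
def pvBuscar (objetivo : String) : List (List (String × String)) → Option (List String)
  | [] => none
  | c :: cs =>
      match pvFindInChunk objetivo c with
      | some r => some r
      | none => pvBuscar objetivo cs

def extraer_seccion_alt (lineas : List String) (nombre : String) (stop_extra : Option (List String)) : List String :=
  let stops := pvStops stop_extra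
  let objetivo := pvNorm nombre
  let chunks := lineas.foldl (pvStep stops objetivo) [[]]
  (pvBuscar objetivo chunks).getD []

-- ===== PRECONDITION & SPEC =====
def Spec_extraer_seccion (lineas : List String) (nombre : String) (stop_extra : Option (List String)) (out : List String) : Prop := out = extraer_seccion_alt lineas nombre stop_extra
instance (lineas : List String) (nombre : String) (stop_extra : Option (List String)) (out : List String) : Decidable (Spec_extraer_seccion lineas nombre stop_extra out) := by unfold Spec_extraer_seccion; infer_instance

-- ===== CLAIM (what is proved, stated in full; the proofs are below) =====
def Claim_equal_extraer_seccion : Prop := ∀ (lineas : List String) (nombre : String) (stop_extra : Option (List String)), Dom_extraer_seccion lineas nombre stop_extra → Spec_extraer_seccion lineas nombre stop_extra (extraer_seccion lineas nombre stop_extra)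

-- ===== LEMMAS AND PROOFS =====

-- a line that ends the section: a stop word other than objetivo
def pDelim (stops : PySem.Set String) (objetivo : String) (l : String) : Bool :=
  stops.contains (pvNorm l) && !(pvNorm l == objetivo)

-- head-recursive characterization of B's foldl-built chunk list
def pvSplit (stops : PySem.Set String) (objetivo : String) : List String → List (List (String × String))
  | [] => [[]]
  | l :: tl =>
      if pDelim stops objetivo l then [] :: pvSplit stops objetivo tl
      else
        match pvSplit stops objetivo tl with
        | [] => [[(pvNorm l, l)]]
        | c :: cs => ((pvNorm l, l) :: c) :: cs

-- common characterization of both programs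
def AFopt (stops : PySem.Set String) (objetivo : String) : List String → Option (List String)
  | [] => none
  | l :: tl =>
      if pvNorm l == objetivo then some (tl.takeWhile (fun x => !pDelim stops objetivo x))
      else AFopt stops objetivo tl

theorem pvSplit_ne_nil (stops : PySem.Set String) (objetivo : String) (xs : List String) :
    pvSplit stops objetivo xs ≠ [] := by
  cases xs with
  | nil => simp [pvSplit]
  | cons l tl =>
      simp only [pvSplit]
      split_ifs
      · simp
      · cases pvSplit stops objetivo tl <;> simp

theorem pvAppendLast_append {α : Type} (pre : List (List α)) (cur : List α) (x : α) :
    pvAppendLast (pre ++ [cur]) x = pre ++ [cur ++ [x]] := by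
  induction pre with
  | nil => rfl
  | cons a pre ih =>
      cases h : pre ++ [cur] with
      | nil => simp at h
      | cons b rest =>
          simp only [List.cons_append, h, pvAppendLast, List.cons.injEq]
          rw [← h, ih]
          simp

theorem foldl_pvStep_eq (stops : PySem.Set String) (objetivo : String) (xs : List String) :
    ∀ (pre : List (List (String × String))) (cur : List (String × String)),
      List.foldl (pvStep stops objetivo) (pre ++ [cur]) xs =
        pre ++ (match pvSplit stops objetivo xs with
                | [] => [cur]
                | c :: cs => (cur ++ c) :: cs) := by
  induction xs with
  | nil => intro pre cur; simp [pvSplit]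
  | cons l tl ih =>
      intro pre cur
      simp only [List.foldl_cons, pvStep, pvSplit, pDelim]
      split_ifs with h
      · have : (pre ++ [cur]) ++ [[]] = (pre ++ [cur]) ++ [([] : List (String × String))] := rfl
        rw [List.append_assoc] at this
        calc List.foldl (pvStep stops objetivo) (pre ++ [cur] ++ [[]]) tl
            = List.foldl (pvStep stops objetivo) ((pre ++ [cur]) ++ [[]]) tl := rfl
          _ = (pre ++ [cur]) ++ (match pvSplit stops objetivo tl with
                | [] => [([] : List (String × String))]
                | c :: cs => (([] : List (String × String)) ++ c) :: cs) := ih (pre ++ [cur]) []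
          _ = _ := by
              cases hsp : pvSplit stops objetivo tl with
              | nil => exact absurd hsp (pvSplit_ne_nil _ _ _)
              | cons c cs => simp
      · rw [pvAppendLast_append, ih pre (cur ++ [(pvNorm l, l)])]
        cases hsp : pvSplit stops objetivo tl with
        | nil => exact absurd hsp (pvSplit_ne_nil _ _ _)
        | cons c cs => simp

theorem pvSplit_head_takeWhile (stops : PySem.Set String) (objetivo : String) :
    ∀ (xs : List String) (c : List (String × String)) (cs : List (List (String × String))),
      pvSplit stops objetivo xs = c :: cs →
      c.map Prod.snd = xs.takeWhile (fun l => !pDelim stops objetivo l) := by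
  intro xs
  induction xs with
  | nil => intro c cs h; simp [pvSplit] at h; simp [h.1]
  | cons l tl ih =>
      intro c cs h
      simp only [pvSplit] at h
      by_cases hd : pDelim stops objetivo l = true
      · rw [if_pos hd] at h
        injection h with h1 h2
        subst h1
        simp [hd]
      · have hdf : pDelim stops objetivo l = false := by simpa using hd
        rw [if_neg hd] at h
        cases hsp : pvSplit stops objetivo tl with
        | nil => exact absurd hsp (pvSplit_ne_nil _ _ _)
        | cons c' cs' =>
            rw [hsp] at h
            injection h with h1 h2
            subst h1
            simp only [List.map_cons, List.takeWhile_cons, hdf, Bool.not_false, if_pos]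
            rw [ih c' cs' hsp]

theorem pvBuscar_pvSplit (stops : PySem.Set String) (objetivo : String) (xs : List String) :
    pvBuscar objetivo (pvSplit stops objetivo xs) = AFopt stops objetivo xs := by
  induction xs with
  | nil => rfl
  | cons l tl ih =>
      simp only [pvSplit, AFopt]
      by_cases hd : pDelim stops objetivo l = true
      · have hne : (pvNorm l == objetivo) = false := by
          simp only [pDelim, Bool.and_eq_true, Bool.not_eq_true'] at hd
          exact hd.2
        rw [if_pos hd, hne]
        simp only [Bool.false_eq_true, if_false]
        show pvBuscar objetivo (pvSplit stops objetivo tl) = AFopt stops objetivo tl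
        exact ih
      · rw [if_neg hd]
        cases hsp : pvSplit stops objetivo tl with
        | nil => exact absurd hsp (pvSplit_ne_nil _ _ _)
        | cons c cs =>
            rw [hsp] at ih
            simp only [pvBuscar, pvFindInChunk]
            by_cases hobj : (pvNorm l == objetivo) = true
            · rw [if_pos hobj, if_pos hobj]
              rw [pvSplit_head_takeWhile stops objetivo tl c cs hsp]
            · rw [if_neg hobj, if_neg hobj]
              exact ih

theorem pvAInner_eq (lineas : List String) (stops : PySem.Set String) (objetivo : String) (j : Nat) :
    pvAInner lineas stops objetivo j =
      (lineas.drop j).takeWhile (fun l => !pDelim stops objetivo l) := by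
  fun_induction pvAInner lineas stops objetivo j with
  | case1 j h lj hstop =>
      rw [List.drop_eq_getElem_cons h]
      simp only [List.takeWhile_cons, lj, pDelim] at hstop ⊢
      rw [hstop]
      rfl
  | case2 j h lj hstop ih =>
      rw [List.drop_eq_getElem_cons h]
      simp only [List.takeWhile_cons, lj, pDelim, Bool.not_eq_true] at hstop ⊢
      rw [hstop, ih]
      rfl
  | case3 j h =>
      rw [List.drop_eq_nil_of_le (by omega)]
      rfl

theorem pvAScan_AFopt (stops : PySem.Set String) (objetivo : String) (lineas : List String) :
    ∀ (rest : List String) (i : Nat), lineas.drop i = rest →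
      pvAScan stops objetivo lineas rest i = (AFopt stops objetivo rest).getD [] := by
  intro rest
  induction rest with
  | nil => intro i _; rfl
  | cons l tl ih =>
      intro i hdrop
      have htl : lineas.drop (i + 1) = tl := by
        rw [← List.drop_drop]
        simp [hdrop]
      simp only [pvAScan, AFopt]
      by_cases hobj : (pvNorm l == objetivo) = true
      · simp only [hobj, if_pos, Option.getD_some]
        rw [pvAInner_eq, htl]
      · simp only [hobj, if_false]
        exact ih (i + 1) htl

-- ===== VERDICT (by name: the statement is the Claim_ definition above) =====
theorem extraer_seccion_spec : Claim_equal_extraer_seccion := by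
  intro lineas nombre stop_extra _
  unfold Spec_extraer_seccion
  show extraer_seccion lineas nombre stop_extra
      = (pvBuscar (pvNorm nombre)
          (List.foldl (pvStep (pvStops stop_extra) (pvNorm nombre)) [[]] lineas)).getD []
  show pvAScan (pvStops stop_extra) (pvNorm nombre) lineas lineas 0
      = (pvBuscar (pvNorm nombre)
          (List.foldl (pvStep (pvStops stop_extra) (pvNorm nombre)) [[]] lineas)).getD []
  rw [pvAScan_AFopt (pvStops stop_extra) (pvNorm nombre) lineas lineas 0 (by simp)]
  have hfold := foldl_pvStep_eq (pvStops stop_extra) (pvNorm nombre) lineas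
    ([] : List (List (String × String))) []
  simp only [List.nil_append] at hfold
  rw [hfold]
  cases hsp : pvSplit (pvStops stop_extra) (pvNorm nombre) lineas with
  | nil => exact absurd hsp (pvSplit_ne_nil _ _ _)
  | cons c cs =>
      have hb := pvBuscar_pvSplit (pvStops stop_extra) (pvNorm nombre) lineas
      rw [hsp] at hb
      rw [← hb]
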